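-- pv_equiv track=rewrite | github.com/hgtrfbvd/Demonpulse- | safety.py | apply_confidence_decay
-- ===== SOURCE A (Python) =====
-- def apply_confidence_decay(confidence, minutes_since_scored):
--     """Reduce confidence if data is getting stale near jump."""
--     decay_map = {
--         "ELITE": [(30, "HIGH"), (60, "MODERATE")],
--         "HIGH": [(30, "MODERATE"), (60, "LOW")],
--         "MODERATE": [(30, "LOW"), (60, "INSUFFICIENT")],
--     }
--     thresholds = decay_map.get(confidence, [])
--     # Sort descending so highest threshold wins
--     for minutes, new_confidence in sorted(thresholds, key=lambda x: x[0], reverse=True):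
--         if minutes_since_scored >= minutes:
--             return new_confidence
--     return confidence
-- ===== SOURCE B (Python) =====
-- def apply_confidence_decay(confidence, minutes_since_scored):
--     """Reduce confidence if data is getting stale near jump."""
--     if minutes_since_scored >= 60:
--         return {"ELITE": "MODERATE", "HIGH": "LOW", "MODERATE": "INSUFFICIENT"}.get(confidence, confidence)
--     if minutes_since_scored >= 30:
--         return {"ELITE": "HIGH", "HIGH": "MODERATE", "MODERATE": "LOW"}.get(confidence, confidence)
--     return confidence
-- ===== Notes on version B (the rewrite author's own statement) =====
-- stated objective: simpler
-- what changed: B branches on the staleness time first and uses two flat confidence->confidence lookup tables, removing A's per-confidence threshold lists, the sort and the early-return loop.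
import Mathlib
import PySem

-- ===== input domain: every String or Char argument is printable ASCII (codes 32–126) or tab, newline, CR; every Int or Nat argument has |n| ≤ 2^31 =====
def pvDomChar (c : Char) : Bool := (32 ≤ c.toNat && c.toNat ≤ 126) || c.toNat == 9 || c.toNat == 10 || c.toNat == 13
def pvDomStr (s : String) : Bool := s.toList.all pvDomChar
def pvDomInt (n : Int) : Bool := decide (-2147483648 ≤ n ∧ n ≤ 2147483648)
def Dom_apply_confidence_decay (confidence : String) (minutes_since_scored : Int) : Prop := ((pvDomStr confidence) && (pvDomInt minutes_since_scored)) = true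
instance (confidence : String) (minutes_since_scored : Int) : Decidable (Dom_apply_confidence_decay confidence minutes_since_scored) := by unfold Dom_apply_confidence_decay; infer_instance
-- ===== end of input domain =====

-- B replaces A's confidence-keyed threshold lists + sort + early-return loop by time-first
-- branches with flat lookup tables (objective: simpler).

-- ===== PORT A =====
-- the early-return loop of A: first threshold (in the given order) that fires
def decayLoopA (minutes_since_scored : Int) : List (Int × String) → Option String
  | [] => none
  | (minutes, new_confidence) :: rest =>
      if minutes_since_scored ≥ minutes then some new_confidence
      else decayLoopA minutes_since_scored rest

def apply_confidence_decay (confidence : String) (minutes_since_scored : Int) : String :=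
  let decay_map : PySem.Dict String (List (Int × String)) :=
    PySem.Dict.ofList [("ELITE", [(30, "HIGH"), (60, "MODERATE")]),
                       ("HIGH", [(30, "MODERATE"), (60, "LOW")]),
                       ("MODERATE", [(30, "LOW"), (60, "INSUFFICIENT")])]
  let thresholds := decay_map.getD confidence []
  let sortedThresholds := PySem.List.sorted (key := fun x => x.1) (reverse := true) thresholds
  match decayLoopA minutes_since_scored sortedThresholds with
  | some c => c
  | none => confidence

-- ===== PORT B =====
def apply_confidence_decay_alt (confidence : String) (minutes_since_scored : Int) : String :=
  if minutes_since_scored ≥ 60 then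
    (PySem.Dict.ofList [("ELITE", "MODERATE"), ("HIGH", "LOW"), ("MODERATE", "INSUFFICIENT")]).getD confidence confidence
  else if minutes_since_scored ≥ 30 then
    (PySem.Dict.ofList [("ELITE", "HIGH"), ("HIGH", "MODERATE"), ("MODERATE", "LOW")]).getD confidence confidence
  else confidence

-- ===== PRECONDITION & SPEC =====
def Spec_apply_confidence_decay (confidence : String) (minutes_since_scored : Int) (out : String) : Prop := out = apply_confidence_decay_alt confidence minutes_since_scored
instance (confidence : String) (minutes_since_scored : Int) (out : String) : Decidable (Spec_apply_confidence_decay confidence minutes_since_scored out) := by unfold Spec_apply_confidence_decay; infer_instance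

-- ===== CLAIM (what is proved, stated in full; the proofs are below) =====
def Claim_equal_apply_confidence_decay : Prop := ∀ (confidence : String) (minutes_since_scored : Int), Dom_apply_confidence_decay confidence minutes_since_scored → Spec_apply_confidence_decay confidence minutes_since_scored (apply_confidence_decay confidence minutes_since_scored)

-- ===== LEMMAS AND PROOFS =====

-- ===== VERDICT (by name: the statement is the Claim_ definition above) =====
theorem apply_confidence_decay_spec : Claim_equal_apply_confidence_decay := by
  intro confidence minutes_since_scored _
  unfold Spec_apply_confidence_decay apply_confidence_decay apply_confidence_decay_alt
  by_cases h60 : minutes_since_scored ≥ 60 <;> by_cases h30 : minutes_since_scored ≥ 30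
  all_goals
    by_cases h1 : confidence = "ELITE"
    · subst h1; simp [PySem.Dict.ofList, PySem.Dict.getD, PySem.Dict.get?, PySem.Dict.update, PySem.Dict.empty, PySem.Dict.insert, PySem.List.sorted, PySem.List.insertBy, List.foldl, decayLoopA, h60, h30]
    · by_cases h2 : confidence = "HIGH"
      · subst h2; simp [PySem.Dict.ofList, PySem.Dict.getD, PySem.Dict.get?, PySem.Dict.update, PySem.Dict.empty, PySem.Dict.insert, PySem.List.sorted, PySem.List.insertBy, List.foldl, decayLoopA, h60, h30]
      · by_cases h3 : confidence = "MODERATE"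
        · subst h3; simp [PySem.Dict.ofList, PySem.Dict.getD, PySem.Dict.get?, PySem.Dict.update, PySem.Dict.empty, PySem.Dict.insert, PySem.List.sorted, PySem.List.insertBy, List.foldl, decayLoopA, h60, h30]
        · have e1 : (("ELITE" : String) == confidence) = false := by
            simp [Ne.symm h1]
          have e2 : (("HIGH" : String) == confidence) = false := by
            simp [Ne.symm h2]
          have e3 : (("MODERATE" : String) == confidence) = false := by
            simp [Ne.symm h3]
          simp [PySem.Dict.ofList, PySem.Dict.getD, PySem.Dict.get?, PySem.Dict.update, PySem.Dict.empty, PySem.Dict.insert, PySem.List.sorted, List.find?, List.foldl, decayLoopA, h60, h30, e1, e2, e3]
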